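-- pv_equiv track=rewrite | github.com/COMCIFS/instrument-geometry-info | Tools/dials2imgcif.py | cif_loop
-- ===== SOURCE A (Python) =====
-- def cif_loop(base_name: str, fields: list, rows) -> str:
--     """Assemble a loop_ table ready to be written to a CIF file"""
--     for i, row in enumerate(rows, start=1):
--         if len(row) == 1 and row[0].startswith('#'):
--             continue  # Comment row
--         if len(row) != len(fields):
--             raise ValueError(
--                 f"Row {i} has unexpected length ({len(row)} != {len(fields)}"
--             )
--     lines = ["loop_"] + [
--         f" {base_name}.{f}" for f in fields
--     ] + [""] + [
--         "  " + "\t".join([str(v) for v in r]) for r in rows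
--     ] + ["", ""]
--     return "\n".join(lines)
-- ===== SOURCE B (Python) =====
-- def cif_loop(base_name: str, fields: list, rows) -> str:
--     """Assemble a loop_ table ready to be written to a CIF file"""
--     def emit_fields(fs):
--         if not fs:
--             return "\n"
--         return f" {base_name}.{fs[0]}\n" + emit_fields(fs[1:])
--
--     def emit_rows(rs, i):
--         if not rs:
--             return "\n"
--         row = rs[0]
--         if not (len(row) == 1 and row[0].startswith('#')) and len(row) != len(fields):
--             raise ValueError(
--                 f"Row {i} has unexpected length ({len(row)} != {len(fields)}"
--             )
--         return "  " + "\t".join(str(v) for v in row) + "\n" + emit_rows(rs[1:], i + 1)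
--
--     return "loop_\n" + emit_fields(fields) + emit_rows(rows, 1)
-- ===== Notes on version B (the rewrite author's own statement) =====
-- stated objective: alternative
-- what changed: B replaces A's validate-then-build-a-line-list-and-join pipeline with two recursive emitters that generate the header and the rows back-to-front by string concatenation, interleaving the length validation with row emission.
import Mathlib
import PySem

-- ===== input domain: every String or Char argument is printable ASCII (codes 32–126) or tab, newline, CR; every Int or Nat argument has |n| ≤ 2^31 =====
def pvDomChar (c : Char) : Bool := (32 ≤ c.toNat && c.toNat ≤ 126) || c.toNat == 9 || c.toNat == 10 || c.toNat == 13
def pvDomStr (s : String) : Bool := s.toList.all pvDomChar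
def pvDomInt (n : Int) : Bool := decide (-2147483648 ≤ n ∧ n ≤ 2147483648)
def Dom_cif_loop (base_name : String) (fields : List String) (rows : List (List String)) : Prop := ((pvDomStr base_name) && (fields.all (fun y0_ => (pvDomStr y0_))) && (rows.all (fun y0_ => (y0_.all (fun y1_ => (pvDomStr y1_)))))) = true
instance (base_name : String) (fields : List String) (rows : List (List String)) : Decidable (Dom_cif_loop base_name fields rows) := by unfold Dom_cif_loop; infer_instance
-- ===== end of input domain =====

-- B generates the text with two recursive emitters (header lines, then rows, built back-to-front
-- by concatenation, validation interleaved with row emission) instead of A's validation loop plus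
-- list-of-lines join; objective: alternative decomposition.

-- ===== PORT A =====
-- A's validation loop either does nothing or raises ValueError; the raising inputs are
-- exactly those excluded by Pre_cif_loop, so the port goes straight to the list assembly.
def cif_loop (base_name : String) (fields : List String) (rows : List (List String)) : String :=
  let lines : List String :=
    ["loop_"]
    ++ fields.map (fun f => " " ++ base_name ++ "." ++ f)
    ++ [""]
    ++ rows.map (fun r => "  " ++ PySem.Str.join "\t" r)
    ++ ["", ""]
  PySem.Str.join "\n" lines

-- ===== PORT B =====
def pvEmitFields (base_name : String) : List String → String
  | [] => "\n"
  | f :: fs => " " ++ base_name ++ "." ++ f ++ "\n" ++ pvEmitFields base_name fs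

-- B's length check raises exactly outside Pre_cif_loop; on admitted inputs only the append happens
def pvEmitRows : List (List String) → String
  | [] => "\n"
  | r :: rs => "  " ++ PySem.Str.join "\t" r ++ "\n" ++ pvEmitRows rs

def cif_loop_alt (base_name : String) (fields : List String) (rows : List (List String)) : String :=
  "loop_\n" ++ pvEmitFields base_name fields ++ pvEmitRows rows

-- ===== PRECONDITION & SPEC =====
-- Pre_ excludes exactly the inputs on which A (and B) raise ValueError: a row that is not a
-- one-element '#'-comment and whose length differs from the number of fields.
def Pre_cif_loop (_base_name : String) (fields : List String) (rows : List (List String)) : Prop :=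
  ∀ row ∈ rows, (row.length = 1 ∧ PySem.Str.startswith row.headI "#" = true) ∨ row.length = fields.length
instance (base_name : String) (fields : List String) (rows : List (List String)) : Decidable (Pre_cif_loop base_name fields rows) := by unfold Pre_cif_loop; infer_instance

def pvWitness_cif_loop : String × List String × List (List String) :=
  ("_diffrn_scan.id", ["id", "frames"], [["SCAN1", "10"], ["#comment"], ["SCAN2", "5"]])

def Spec_cif_loop (base_name : String) (fields : List String) (rows : List (List String)) (out : String) : Prop := out = cif_loop_alt base_name fields rows
instance (base_name : String) (fields : List String) (rows : List (List String)) (out : String) : Decidable (Spec_cif_loop base_name fields rows out) := by unfold Spec_cif_loop; infer_instance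

-- ===== CLAIM (what is proved, stated in full; the proofs are below) =====
def Claim_equal_cif_loop : Prop := ∀ (base_name : String) (fields : List String) (rows : List (List String)), Dom_cif_loop base_name fields rows → Pre_cif_loop base_name fields rows → Spec_cif_loop base_name fields rows (cif_loop base_name fields rows)

-- ===== LEMMAS AND PROOFS =====

theorem pv_witness_ok :
    Dom_cif_loop pvWitness_cif_loop.1 pvWitness_cif_loop.2.1 pvWitness_cif_loop.2.2 ∧
    Pre_cif_loop pvWitness_cif_loop.1 pvWitness_cif_loop.2.1 pvWitness_cif_loop.2.2 := by decide

-- peel one line off a '\n'-join when more lines follow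
theorem pv_join_cons (x : List Char) (l : List (List Char)) (h : l ≠ []) :
    PySem.Chars.join ['\n'] (x :: l) = x ++ '\n' :: PySem.Chars.join ['\n'] l := by
  cases l with
  | nil => exact absurd rfl h
  | cons b t => rw [PySem.Chars.join_cons_cons]; simp

-- the field block of the join equals B's recursive field emitter
theorem pv_join_fields (base_name : String) (fields : List String) (t : List (List Char)) (h : t ≠ []) :
    PySem.Chars.join ['\n'] (fields.map (fun f => (" " ++ base_name ++ "." ++ f).toList) ++ [] :: t) =
      (pvEmitFields base_name fields).toList ++ PySem.Chars.join ['\n'] t := by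
  induction fields with
  | nil =>
      rw [List.map_nil, List.nil_append, pv_join_cons [] t h]
      simp [pvEmitFields, show ("\n" : String).toList = ['\n'] from by decide]
  | cons f fs ih =>
      rw [List.map_cons, List.cons_append,
        pv_join_cons _ _ (by simp), ih]
      simp [pvEmitFields, String.toList_append, List.append_assoc]

-- the row block (plus the two trailing empty lines) equals B's recursive row emitter
theorem pv_join_rows (rows : List (List String)) :
    PySem.Chars.join ['\n'] (rows.map (fun r => ("  " ++ PySem.Str.join "\t" r).toList) ++ [[], []]) =
      (pvEmitRows rows).toList := by
  induction rows with
  | nil =>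
      rw [List.map_nil, List.nil_append, pv_join_cons [] [[]] (by simp)]
      simp [pvEmitRows, PySem.Chars.join_singleton, show ("\n" : String).toList = ['\n'] from by decide]
  | cons r rs ih =>
      rw [List.map_cons, List.cons_append, pv_join_cons _ _ (by simp), ih]
      simp [pvEmitRows, String.toList_append, List.append_assoc]

-- ===== VERDICT (by name: the statement is the Claim_ definition above) =====
theorem cif_loop_spec : Claim_equal_cif_loop := by
  intro base_name fields rows _ _
  unfold Spec_cif_loop cif_loop cif_loop_alt
  apply String.toList_inj.mp
  dsimp only
  rw [PySem.Str.toList_join]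
  simp only [List.map_append, List.map_cons, List.map_nil, List.map_map, Function.comp_def]
  have h1 : ("\n" : String).toList = ['\n'] := by decide
  have h2 : ("" : String).toList = ([] : List Char) := by decide
  rw [h1, h2]
  simp only [List.append_assoc, List.cons_append, List.nil_append]
  rw [pv_join_cons _ _ (by simp), pv_join_fields base_name fields _ (by simp), pv_join_rows]
  simp [String.toList_append, show ("loop_\n" : String).toList = "loop_".toList ++ ['\n'] from by decide]
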